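-- pv_equiv track=rewrite | github.com/WCBru/Loose-Scripts | Small Challenges/Advent of Code/2019/4/b.py | valid_pw
-- ===== SOURCE A (Python) =====
-- def valid_pw(string):
--     lists = []
--     startInd = 0
--     for i in range(len(string)):
--         if string[i] != string[startInd]:
--             lists.append(string[startInd:i])
--             startInd = i
--
--     lists.append(string[startInd:])
--     return any([len(part) == 2 for part in lists])
-- ===== SOURCE B (Python) =====
-- def valid_pw(string):
--     n = len(string)
--     for i in range(n - 1):
--         if string[i] == string[i + 1] and (i == 0 or string[i - 1] != string[i]) and (i + 2 >= n or string[i + 2] != string[i]):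
--             return True
--     return False
-- ===== Notes on version B (the rewrite author's own statement) =====
-- stated objective: faster
-- what changed: Instead of building the list of all maximal runs via slicing and then filtering it for a length-2 run, B scans each index once and tests a local neighbour window (equal to next char, different from previous and from the one after next) to detect a maximal pair directly, returning early on the first hit.
import Mathlib
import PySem

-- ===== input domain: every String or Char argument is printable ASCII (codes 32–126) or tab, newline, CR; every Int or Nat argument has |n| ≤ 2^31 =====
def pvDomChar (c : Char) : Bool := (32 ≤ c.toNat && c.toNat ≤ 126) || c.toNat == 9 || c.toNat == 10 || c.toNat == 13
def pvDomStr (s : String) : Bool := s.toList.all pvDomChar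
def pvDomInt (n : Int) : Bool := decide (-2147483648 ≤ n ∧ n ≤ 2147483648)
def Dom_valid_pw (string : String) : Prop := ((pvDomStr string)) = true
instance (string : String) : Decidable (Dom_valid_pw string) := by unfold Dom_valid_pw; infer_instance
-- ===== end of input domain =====

-- B differs from A only in decomposition: A groups the string into maximal runs and checks
-- any run has length 2; B checks a local neighbour window at each index. Same return value.

-- ===== PORT A =====
-- one loop step of A: compare string[i] with string[startInd]; flush the slice on a change
def stepA (s : List Char) (st : List (List Char) × Int) (i : Int) : List (List Char) × Int :=
  if PySem.List.pyGetD s i ' ' ≠ PySem.List.pyGetD s st.2 ' ' then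
    (st.1 ++ [PySem.List.slice s (some st.2) (some i)], i)
  else st

-- after the loop: append the final slice and take any(len(part) == 2)
def finishA (s : List Char) (st : List (List Char) × Int) : Bool :=
  ((st.1 ++ [PySem.List.slice s (some st.2) none]).map (fun part => part.length == 2)).any (fun b => b)

def valid_pw (string : String) : Bool :=
  let s := string.toList
  finishA s ((PySem.List.pyRange 0 (s.length : Int) 1).foldl (stepA s) ([], 0))

-- ===== PORT B =====
-- the local window test at index i (Source B's if-condition; short-circuit order preserved)
def condB (s : List Char) (i : Int) : Bool :=
  (PySem.List.pyGetD s i ' ' == PySem.List.pyGetD s (i + 1) ' ')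
  && ((i == 0) || (PySem.List.pyGetD s (i - 1) ' ' != PySem.List.pyGetD s i ' '))
  && ((decide ((s.length : Int) ≤ i + 2)) || (PySem.List.pyGetD s (i + 2) ' ' != PySem.List.pyGetD s i ' '))

-- Source B's for-loop with early return
def altLoop (s : List Char) : List Int → Bool
  | [] => false
  | i :: rest => if condB s i then true else altLoop s rest

def valid_pw_alt (string : String) : Bool :=
  let s := string.toList
  altLoop s (PySem.List.pyRange 0 ((s.length : Int) - 1) 1)

-- ===== PRECONDITION & SPEC =====
def Spec_valid_pw (string : String) (out : Bool) : Prop := out = valid_pw_alt string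
instance (string : String) (out : Bool) : Decidable (Spec_valid_pw string out) := by unfold Spec_valid_pw; infer_instance

-- ===== CLAIM (what is proved, stated in full; the proofs are below) =====
def Claim_equal_valid_pw : Prop := ∀ (string : String), Dom_valid_pw string → Spec_valid_pw string (valid_pw string)

-- ===== LEMMAS AND PROOFS =====

-- reference spec: scanning a run of char c already k long, rest of the string follows
def contRun (c : Char) (k : Nat) : List Char → Bool
  | [] => k == 2
  | x :: xs => if x == c then contRun c (k + 1) xs else (k == 2) || contRun x 1 xs

def hasRun2 : List Char → Bool
  | [] => false
  | c :: xs => contRun c 1 xs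

def leadCount (c : Char) : List Char → Nat
  | [] => 0
  | x :: xs => if x = c then leadCount c xs + 1 else 0

def dropLead (c : Char) : List Char → List Char
  | [] => []
  | x :: xs => if x = c then dropLead c xs else x :: xs

lemma lead_split (c : Char) (l : List Char) :
    l = List.replicate (leadCount c l) c ++ dropLead c l := by
  induction l with
  | nil => rfl
  | cons x xs ih =>
      by_cases h : x = c
      · simp [leadCount, dropLead, h, List.replicate_succ]; exact ih
      · simp [leadCount, dropLead, h]

lemma dropLead_head (c : Char) (l : List Char) : (dropLead c l).head? ≠ some c := by
  induction l with
  | nil => simp [dropLead]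
  | cons x xs ih =>
      by_cases h : x = c
      · simpa [dropLead, h] using ih
      · simp [dropLead, h]

lemma dropLead_len (c : Char) (l : List Char) : (dropLead c l).length ≤ l.length := by
  induction l with
  | nil => simp [dropLead]
  | cons x xs ih =>
      by_cases h : x = c
      · simp [dropLead, h]; omega
      · simp [dropLead, h]

lemma contRun_replicate (c : Char) (k m : Nat) (t : List Char) :
    contRun c k (List.replicate m c ++ t) = contRun c (k + m) t := by
  induction m generalizing k with
  | zero => simp
  | succ m ih =>
      rw [List.replicate_succ]
      simp only [List.cons_append, contRun, beq_self_eq_true, if_true]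
      rw [ih]
      congr 1
      omega

lemma getD_at (pre : List Char) (x : Char) (suf : List Char) (d : Char) :
    PySem.List.pyGetD (pre ++ x :: suf) ((pre.length : Nat) : Int) d = x := by
  rw [PySem.List.pyGetD_natCast]
  simp [List.getD]

-- ===== A-side: the fold over indices computes the run decomposition =====
lemma loopA_eq (rest : List Char) : ∀ (pre0 : List Char) (c : Char) (k : Nat), 1 ≤ k →
    ∀ (s : List Char), s = pre0 ++ List.replicate k c ++ rest →
    ∀ (lists : List (List Char)),
    finishA s ((PySem.List.pyRange ((pre0.length + k : Nat) : Int) (s.length : Int) 1).foldl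
        (stepA s) (lists, (pre0.length : Int)))
      = ((lists.any (fun p => p.length == 2)) || contRun c k rest) := by
  induction rest with
  | nil =>
      intro pre0 c k hk s hs lists
      have hlen : s.length = pre0.length + k := by subst hs; simp
      rw [PySem.List.pyRange_one_eq_nil (by omega)]
      simp only [List.foldl_nil, finishA]
      rw [PySem.List.slice_from_natCast]
      subst hs
      simp [List.any_append, contRun, Function.comp_def]
  | cons x r' ih =>
      intro pre0 c k hk s hs lists
      have hlen : s.length = pre0.length + k + (x :: r').length := by subst hs; simp; omega
      have hcons : PySem.List.pyRange ((pre0.length + k : Nat) : Int) (s.length : Int) 1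
          = ((pre0.length + k : Nat) : Int) :: PySem.List.pyRange (((pre0.length + k : Nat) : Int) + 1) (s.length : Int) 1 := by
        apply PySem.List.pyRange_one_cons
        have : pre0.length + k < s.length := by simp [hlen]
        exact_mod_cast this
      -- the two characters compared at this step
      obtain ⟨k', rfl⟩ : ∃ k', k = k' + 1 := ⟨k - 1, by omega⟩
      have hx : PySem.List.pyGetD s ((pre0.length + (k' + 1) : Nat) : Int) ' ' = x := by
        have : s = (pre0 ++ List.replicate (k' + 1) c) ++ x :: r' := by simp [hs]
        rw [this]
        have hl : (pre0 ++ List.replicate (k' + 1) c).length = pre0.length + (k' + 1) := by simp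
        rw [← hl, getD_at]
      have hc : PySem.List.pyGetD s ((pre0.length : Nat) : Int) ' ' = c := by
        have : s = pre0 ++ c :: (List.replicate k' c ++ x :: r') := by
          simp [hs, List.replicate_succ]
        rw [this, getD_at]
      rw [hcons, List.foldl_cons]
      by_cases hxc : x = c
      · -- same char: state unchanged, the run grows
        have hstep : stepA s (lists, (pre0.length : Int)) ((pre0.length + (k' + 1) : Nat) : Int)
            = (lists, (pre0.length : Int)) := by
          have hx' := hx
          push_cast at hx'
          simp [stepA, hx', hc, hxc]
        rw [hstep]
        have hs' : s = pre0 ++ List.replicate (k' + 2) c ++ r' := by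
          rw [hs, hxc]
          simp [List.replicate_succ' (n := k' + 1)]
        have := ih pre0 c (k' + 2) (by omega) s hs' lists
        have harg : (((pre0.length + (k' + 2) : Nat) : Int)) = ((pre0.length + (k' + 1) : Nat) : Int) + 1 := by
          push_cast; ring
        rw [harg] at this
        rw [this]
        have : contRun c (k' + 1) (x :: r') = contRun c (k' + 2) r' := by
          simp [contRun, hxc]
        rw [this]
      · -- run boundary: flush the slice, start a new run at x
        have hstep : stepA s (lists, (pre0.length : Int)) ((pre0.length + (k' + 1) : Nat) : Int)
            = (lists ++ [List.replicate (k' + 1) c], ((pre0.length + (k' + 1) : Nat) : Int)) := by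
          simp only [stepA, hc]
          rw [if_pos (by rw [hx]; exact hxc)]
          congr 1
          have : ((pre0.length + (k' + 1) : Nat) : Int) = ((pre0.length : Nat) : Int) + ((k' + 1 : Nat) : Int) := by push_cast; ring
          rw [this, PySem.List.slice_natCast_add]
          rw [hs]
          simp
        rw [hstep]
        have hs' : s = (pre0 ++ List.replicate (k' + 1) c) ++ List.replicate 1 x ++ r' := by
          simp [hs]
        have := ih (pre0 ++ List.replicate (k' + 1) c) x 1 (by omega) s hs' (lists ++ [List.replicate (k' + 1) c])
        have harg : (((pre0 ++ List.replicate (k' + 1) c).length + 1 : Nat) : Int) = ((pre0.length + (k' + 1) : Nat) : Int) + 1 := by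
          simp only [List.length_append, List.length_replicate, List.length_cons, List.length_nil]; push_cast; omega
        have harg2 : (((pre0 ++ List.replicate (k' + 1) c).length : Nat) : Int) = ((pre0.length + (k' + 1) : Nat) : Int) := by
          simp
        rw [harg, harg2] at this
        rw [this]
        have hrhs : contRun c (k' + 1) (x :: r') = ((k' + 1 == 2) || contRun x 1 r') := by
          simp [contRun, hxc]
        rw [hrhs]
        simp [List.any_append, Bool.or_assoc]

lemma valid_pw_eq_hasRun2 (string : String) : valid_pw string = hasRun2 string.toList := by
  unfold valid_pw
  cases hS : string.toList with
  | nil => simp [finishA, PySem.List.slice, hasRun2]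
  | cons c r =>
      simp only []
      have hlen : (c :: r).length = r.length + 1 := by simp
      have hcons : PySem.List.pyRange 0 (((c :: r).length : Nat) : Int) 1
          = 0 :: PySem.List.pyRange 1 (((c :: r).length : Nat) : Int) 1 := by
        apply PySem.List.pyRange_one_cons
        have : 0 < (c :: r).length := by simp
        exact_mod_cast this
      rw [hcons, List.foldl_cons]
      have hstep : stepA (c :: r) (([] : List (List Char)), 0) 0 = (([] : List (List Char)), 0) := by
        simp [stepA]
      rw [hstep]
      have := loopA_eq r ([] : List Char) c 1 (le_refl 1) (c :: r) (by simp) ([] : List (List Char))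
      simp only [List.length_nil, Nat.zero_add, Nat.cast_zero, Nat.cast_one] at this
      rw [this]
      simp [hasRun2]

-- ===== B-side: skipping the interior of a run =====
lemma skip_run (m : Nat) : ∀ (pre : List Char) (c : Char) (rest s : List Char),
    pre.getLast? = some c →
    s = pre ++ List.replicate m c ++ rest →
    altLoop s (PySem.List.pyRange ((pre.length : Nat) : Int) ((s.length : Int) - 1) 1)
      = altLoop s (PySem.List.pyRange ((pre.length + m : Nat) : Int) ((s.length : Int) - 1) 1) := by
  induction m with
  | zero => intro pre c rest s _ _; norm_num
  | succ m ih =>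
      intro pre c rest s hlast hs
      by_cases hin : ((pre.length : Int)) < (s.length : Int) - 1
      · rw [PySem.List.pyRange_one_cons hin]
        obtain ⟨pre', rfl⟩ : ∃ pre', pre = pre' ++ [c] := by
          rcases List.eq_nil_or_concat' pre with h | ⟨ys, y, rfl⟩
          · simp [h] at hlast
          · simp at hlast; exact ⟨ys, by rw [hlast]⟩
        have hci : PySem.List.pyGetD s (((pre' ++ [c]).length : Nat) : Int) ' ' = c := by
          have : s = (pre' ++ [c]) ++ c :: (List.replicate m c ++ rest) := by
            simp [hs, List.replicate_succ]
          rw [this, getD_at]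
        have hcm : PySem.List.pyGetD s ((((pre' ++ [c]).length : Nat) : Int) - 1) ' ' = c := by
          have h1 : (((pre' ++ [c]).length : Nat) : Int) - 1 = ((pre'.length : Nat) : Int) := by
            simp only [List.length_append, List.length_replicate, List.length_cons, List.length_nil]; push_cast; omega
          have h2 : s = pre' ++ c :: (c :: (List.replicate m c ++ rest)) := by
            simp [hs, List.replicate_succ]
          rw [h1, h2, getD_at]
        have hcond : condB s (((pre' ++ [c]).length : Nat) : Int) = false := by
          simp only [condB, hci, hcm]
          have hne : ((((pre' ++ [c]).length : Nat) : Int) == 0) = false := by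
            simp
            omega
          rw [hne]
          simp
        rw [altLoop, hcond, if_neg (by simp)]
        have hs' : s = (pre' ++ [c] ++ [c]) ++ List.replicate m c ++ rest := by
          simp [hs, List.replicate_succ]
        have := ih (pre' ++ [c] ++ [c]) c rest s (by simp) hs'
        have e1 : (((pre' ++ [c] ++ [c]).length : Nat) : Int) = (((pre' ++ [c]).length : Nat) : Int) + 1 := by
          simp only [List.length_append, List.length_replicate, List.length_cons, List.length_nil]; push_cast; omega
        have e2 : ((((pre' ++ [c] ++ [c]).length + m : Nat)) : Int) = (((pre' ++ [c]).length + (m + 1) : Nat) : Int) := by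
          simp only [List.length_append, List.length_replicate, List.length_cons, List.length_nil]; push_cast; omega
        rw [e1, e2] at this
        exact this
      · rw [PySem.List.pyRange_one_eq_nil (by omega), PySem.List.pyRange_one_eq_nil (by push_cast; omega)]

-- ===== B-side: the window test at the start of a run =====
lemma condB_true (pre0 rest s : List Char) (c : Char)
    (hl : pre0.getLast? ≠ some c) (hh : rest.head? ≠ some c)
    (hs : s = pre0 ++ List.replicate 2 c ++ rest) :
    condB s ((pre0.length : Nat) : Int) = true := by
  have hc0 : PySem.List.pyGetD s ((pre0.length : Nat) : Int) ' ' = c := by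
    have h2 : s = pre0 ++ c :: (c :: rest) := by simp [hs, List.replicate_succ]
    rw [h2, getD_at]
  have hc1 : PySem.List.pyGetD s (((pre0.length : Nat) : Int) + 1) ' ' = c := by
    have h1 : ((pre0.length : Nat) : Int) + 1 = (((pre0 ++ [c]).length : Nat) : Int) := by simp
    have h2 : s = (pre0 ++ [c]) ++ c :: rest := by simp [hs, List.replicate_succ]
    rw [h1, h2, getD_at]
  simp only [condB, hc0, hc1, beq_self_eq_true, Bool.true_and]
  apply Bool.and_eq_true_iff.mpr
  refine ⟨?_, ?_⟩
  · rcases List.eq_nil_or_concat' pre0 with h | ⟨ys, y, rfl⟩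
    · simp [h]
    · apply Bool.or_eq_true_iff.mpr; right
      have h1 : (((ys ++ [y]).length : Nat) : Int) - 1 = ((ys.length : Nat) : Int) := by
        simp only [List.length_append, List.length_cons, List.length_nil]; push_cast; omega
      have h2 : s = ys ++ y :: (c :: c :: rest) := by simp [hs, List.replicate_succ]
      rw [h1, h2, getD_at]
      simp only [ne_eq, List.getLast?_append, List.getLast?_singleton, Option.or_some, Option.some.injEq] at hl
      simpa using hl
  · cases rest with
    | nil =>
        apply Bool.or_eq_true_iff.mpr; left
        have hn : s.length = pre0.length + 2 := by simp [hs]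
        simp only [decide_eq_true_eq, hn]
        push_cast
        omega
    | cons x r' =>
        apply Bool.or_eq_true_iff.mpr; right
        have h1 : ((pre0.length : Nat) : Int) + 2 = (((pre0 ++ [c] ++ [c]).length : Nat) : Int) := by
          simp only [List.length_append, List.length_cons, List.length_nil]; push_cast; omega
        have h2 : s = (pre0 ++ [c] ++ [c]) ++ x :: r' := by
          simp [hs, List.replicate_succ]
        rw [h1, h2, getD_at]
        simp only [ne_eq, List.head?_cons, Option.some.injEq] at hh
        simpa using hh

-- a run of length 1 followed by a different char: the window test fails at the run start
lemma condB_false_head (pre0 r' s : List Char) (c x : Char) (hx : ¬ x = c)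
    (hs : s = pre0 ++ [c] ++ x :: r') : condB s ((pre0.length : Nat) : Int) = false := by
  have hc0 : PySem.List.pyGetD s ((pre0.length : Nat) : Int) ' ' = c := by
    have h2 : s = pre0 ++ c :: (x :: r') := by simp [hs]
    rw [h2, getD_at]
  have hc1 : PySem.List.pyGetD s (((pre0.length : Nat) : Int) + 1) ' ' = x := by
    have h1 : ((pre0.length : Nat) : Int) + 1 = (((pre0 ++ [c]).length : Nat) : Int) := by simp
    have h2 : s = (pre0 ++ [c]) ++ x :: r' := by simp [hs]
    rw [h1, h2, getD_at]
  simp only [condB, hc0, hc1]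
  have : (c == x) = false := by
    simp only [beq_eq_false_iff_ne, ne_eq]
    exact fun h => hx h.symm
  simp [this]

-- a run of length ≥ 3: the window test fails at the run start (char two ahead is equal)
lemma condB_false_third (pre0 rest s : List Char) (c : Char) (k : Nat) (hk : 3 ≤ k)
    (hs : s = pre0 ++ List.replicate k c ++ rest) : condB s ((pre0.length : Nat) : Int) = false := by
  obtain ⟨k'', rfl⟩ : ∃ k'', k = k'' + 3 := ⟨k - 3, by omega⟩
  have hc0 : PySem.List.pyGetD s ((pre0.length : Nat) : Int) ' ' = c := by
    have h2 : s = pre0 ++ c :: (List.replicate (k'' + 2) c ++ rest) := by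
      simp [hs, List.replicate_succ]
    rw [h2, getD_at]
  have hc2 : PySem.List.pyGetD s (((pre0.length : Nat) : Int) + 2) ' ' = c := by
    have h1 : ((pre0.length : Nat) : Int) + 2 = (((pre0 ++ [c] ++ [c]).length : Nat) : Int) := by
      simp only [List.length_append, List.length_cons, List.length_nil]; push_cast; omega
    have h2 : s = (pre0 ++ [c] ++ [c]) ++ c :: (List.replicate k'' c ++ rest) := by
      simp [hs, List.replicate_succ]
    rw [h1, h2, getD_at]
  have hn : (decide ((s.length : Int) ≤ ((pre0.length : Nat) : Int) + 2)) = false := by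
    have : s.length = pre0.length + (k'' + 3) + rest.length := by simp [hs]; omega
    simp only [decide_eq_false_iff_not, not_le, this]
    push_cast
    omega
  simp [condB, hc0, hc2, hn]

-- the string ends right after the current run
lemma loopB_nil (pre0 : List Char) (c : Char) (k : Nat) (hk : 1 ≤ k) :
    ∀ (s : List Char), s = pre0 ++ List.replicate k c ++ [] →
    pre0.getLast? ≠ some c →
    altLoop s (PySem.List.pyRange ((pre0.length : Nat) : Int) ((s.length : Int) - 1) 1)
      = contRun c k [] := by
  intro s hs hl
  have hlen : s.length = pre0.length + k := by simp [hs]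
  by_cases hk2 : k = 2
  · subst hk2
    have hcons : PySem.List.pyRange ((pre0.length : Nat) : Int) ((s.length : Int) - 1) 1
        = ((pre0.length : Nat) : Int) :: PySem.List.pyRange (((pre0.length : Nat) : Int) + 1) ((s.length : Int) - 1) 1 := by
      apply PySem.List.pyRange_one_cons
      rw [hlen]; push_cast; omega
    rw [hcons, altLoop, condB_true pre0 [] s c hl (by simp) (by simpa using hs), if_pos rfl]
    simp [contRun]
  · rcases Nat.lt_or_ge k 2 with hk1 | hk3
    · -- k = 1: the loop range is empty
      have hk1' : k = 1 := by omega
      subst hk1'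
      rw [PySem.List.pyRange_one_eq_nil (by rw [hlen]; push_cast; omega), altLoop]
      simp [contRun]
    · -- k ≥ 3: the test fails at the run start; skip the rest of the run, range ends
      have hk3' : 3 ≤ k := by omega
      have hcons : PySem.List.pyRange ((pre0.length : Nat) : Int) ((s.length : Int) - 1) 1
          = ((pre0.length : Nat) : Int) :: PySem.List.pyRange (((pre0.length : Nat) : Int) + 1) ((s.length : Int) - 1) 1 := by
        apply PySem.List.pyRange_one_cons
        rw [hlen]; push_cast; omega
      rw [hcons, altLoop, condB_false_third pre0 [] s c k hk3' hs, if_neg (by simp)]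
      obtain ⟨k', rfl⟩ : ∃ k', k = k' + 1 := ⟨k - 1, by omega⟩
      have hskip := skip_run k' (pre0 ++ [c]) c [] s (by simp)
        (by simp [hs, List.replicate_succ])
      have e1 : (((pre0 ++ [c]).length : Nat) : Int) = ((pre0.length : Nat) : Int) + 1 := by
        simp only [List.length_append, List.length_cons, List.length_nil]; push_cast; omega
      rw [e1] at hskip
      rw [hskip, PySem.List.pyRange_one_eq_nil ?_, altLoop]
      · have h2f : (k' + 1 == 2) = false := by
          simp only [beq_eq_false_iff_ne, ne_eq]
          omega
        simp [contRun, h2f]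
      · rw [hlen]
        simp only [List.length_append, List.length_cons, List.length_nil]
        push_cast
        omega

-- ===== B-side main lemma: from the start of a maximal run the scan computes contRun =====
lemma loopB_eq (N : Nat) : ∀ (rest : List Char), rest.length ≤ N →
    ∀ (pre0 : List Char) (c : Char) (k : Nat), 1 ≤ k →
    ∀ (s : List Char), s = pre0 ++ List.replicate k c ++ rest →
    pre0.getLast? ≠ some c → rest.head? ≠ some c →
    altLoop s (PySem.List.pyRange ((pre0.length : Nat) : Int) ((s.length : Int) - 1) 1)
      = contRun c k rest := by
  induction N with
  | zero =>
      intro rest hr pre0 c k hk s hs hl _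
      have : rest = [] := List.length_eq_zero_iff.mp (by omega)
      subst this
      exact loopB_nil pre0 c k hk s hs hl
  | succ N ih =>
      intro rest hr pre0 c k hk s hs hl hh
      cases rest with
      | nil => exact loopB_nil pre0 c k hk s hs hl
      | cons x r' =>
          have hxc : ¬ x = c := by simpa using hh
          have hlen : s.length = pre0.length + k + (r'.length + 1) := by simp [hs]; omega
          have hcons : PySem.List.pyRange ((pre0.length : Nat) : Int) ((s.length : Int) - 1) 1
              = ((pre0.length : Nat) : Int) :: PySem.List.pyRange (((pre0.length : Nat) : Int) + 1) ((s.length : Int) - 1) 1 := by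
            apply PySem.List.pyRange_one_cons
            rw [hlen]; push_cast; omega
          -- decompose the next run, for the recursive call
          have hsplit := lead_split x r'
          have hstep : altLoop s (PySem.List.pyRange (((pre0.length + k : Nat)) : Int) ((s.length : Int) - 1) 1)
              = contRun x (leadCount x r' + 1) (dropLead x r') := by
            have hs' : s = (pre0 ++ List.replicate k c) ++ List.replicate (leadCount x r' + 1) x ++ dropLead x r' := by
              rw [hs]
              simp only [List.append_assoc, List.append_cancel_left_eq]
              rw [List.replicate_succ]
              simp only [List.cons_append, List.cons.injEq, true_and]
              exact hsplit
            have hlast : (pre0 ++ List.replicate k c).getLast? ≠ some x := by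
              have hgl : (pre0 ++ List.replicate k c).getLast? = some c := by
                obtain ⟨k', rfl⟩ : ∃ k', k = k' + 1 := ⟨k - 1, by omega⟩
                rw [List.replicate_succ', ← List.append_assoc]
                exact List.getLast?_concat
              rw [hgl]
              simp only [ne_eq, Option.some.injEq]
              exact fun h => hxc h.symm
            have := ih (dropLead x r') (le_trans (dropLead_len x r') (by simp only [List.length_cons] at hr; omega))
              (pre0 ++ List.replicate k c) x (leadCount x r' + 1) (by omega) s hs' hlast
              (dropLead_head x r')
            have e : (((pre0 ++ List.replicate k c).length : Nat) : Int) = (((pre0.length + k : Nat)) : Int) := by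
              simp
            rw [e] at this
            exact this
          by_cases hk2 : k = 2
          · subst hk2
            rw [hcons, altLoop, condB_true pre0 (x :: r') s c hl hh hs, if_pos rfl]
            simp [contRun, hxc]
          · -- the test fails at the run start; skip the rest of the run and recurse
            have hfalse : condB s ((pre0.length : Nat) : Int) = false := by
              rcases Nat.lt_or_ge k 2 with hk1 | hk3
              · have : k = 1 := by omega
                subst this
                exact condB_false_head pre0 r' s c x hxc (by simpa using hs)
              · exact condB_false_third pre0 (x :: r') s c k (by omega) hs
            rw [hcons, altLoop, hfalse, if_neg (by simp)]
            obtain ⟨k', rfl⟩ : ∃ k', k = k' + 1 := ⟨k - 1, by omega⟩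
            have hskip := skip_run k' (pre0 ++ [c]) c (x :: r') s (by simp)
              (by simp [hs, List.replicate_succ])
            have e1 : (((pre0 ++ [c]).length : Nat) : Int) = ((pre0.length : Nat) : Int) + 1 := by
              simp only [List.length_append, List.length_cons, List.length_nil]; push_cast; omega
            have e2 : ((((pre0 ++ [c]).length + k' : Nat)) : Int) = (((pre0.length + (k' + 1) : Nat)) : Int) := by
              simp only [List.length_append, List.length_cons, List.length_nil]; push_cast; omega
            rw [e1, e2] at hskip
            rw [hskip, hstep]
            have : contRun c (k' + 1) (x :: r') = ((k' + 1 == 2) || contRun x 1 r') := by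
              simp [contRun, hxc]
            rw [this]
            have hk2f : (k' + 1 == 2) = false := by
              simp only [beq_eq_false_iff_ne, ne_eq]
              omega
            rw [hk2f, Bool.false_or]
            conv_rhs => rw [hsplit]
            rw [contRun_replicate]
            congr 1
            omega

lemma valid_pw_alt_eq_hasRun2 (string : String) : valid_pw_alt string = hasRun2 string.toList := by
  unfold valid_pw_alt
  cases hS : string.toList with
  | nil =>
      show altLoop [] (PySem.List.pyRange 0 ((([] : List Char).length : Int) - 1) 1) = hasRun2 []
      rw [PySem.List.pyRange_one_eq_nil (by simp)]
      rfl
  | cons c r =>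
      show altLoop (c :: r) (PySem.List.pyRange 0 ((((c :: r).length : Nat) : Int) - 1) 1) = hasRun2 (c :: r)
      have hs : c :: r = ([] : List Char) ++ List.replicate (leadCount c r + 1) c ++ dropLead c r := by
        simp only [List.nil_append, List.replicate_succ, List.cons_append, List.cons.injEq, true_and]
        exact lead_split c r
      have := loopB_eq r.length (dropLead c r) (dropLead_len c r) [] c (leadCount c r + 1)
        (by omega) (c :: r) hs (by simp) (dropLead_head c r)
      simp only [List.length_nil, Nat.cast_zero] at this
      rw [this]
      simp only [hasRun2]
      conv_rhs => rw [lead_split c r]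
      rw [contRun_replicate]
      congr 1
      omega

-- ===== VERDICT (by name: the statement is the Claim_ definition above) =====
theorem valid_pw_spec : Claim_equal_valid_pw := by
  intro string _
  unfold Spec_valid_pw
  rw [valid_pw_eq_hasRun2, valid_pw_alt_eq_hasRun2]
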